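-- pv_equiv track=rewrite | github.com/Meta-eindhoven/Meta-eindhoven.github.io | bib.py | fix_latex_encoding
-- ===== SOURCE A (Python) =====
-- def fix_latex_encoding(text):
--     """Manually replace common LaTeX accents."""
--     replacements = {
--         r"{\\c{c}}": "ç",
--         r"{\\'e}": "é",
--         r"{\\`e}": "è",
--         r"{\\o}": "ø",
--         r"{\\\"u}": "ü",
--         r"{\\~n}": "ñ",
--         r"{\\'a}": "á",
--         r"{\\'i}": "í",
--         r"{\\'o}": "ó",
--         r"{\\'u}": "ú"
--     }
--     for latex, utf in replacements.items():
--         text = text.replace(latex, utf)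
--     return text
-- ===== SOURCE B (Python) =====
-- def fix_latex_encoding(text):
--     """Manually replace common LaTeX accents (positional parser, no str.replace)."""
--     acute = {'e': 'é', 'a': 'á', 'i': 'í', 'o': 'ó', 'u': 'ú'}
--     out = []
--     i, n = 0, len(text)
--     while i < n:
--         if text.startswith('{\\\\', i):
--             if text.startswith('c{c}}', i + 3):
--                 out.append('ç'); i += 8; continue
--             if text.startswith("'", i + 3) and i + 5 < n and text[i + 4] in acute and text[i + 5] == '}':
--                 out.append(acute[text[i + 4]]); i += 6; continue
--             if text.startswith('`e}', i + 3):
--                 out.append('è'); i += 6; continue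
--             if text.startswith('o}', i + 3):
--                 out.append('ø'); i += 5; continue
--             if text.startswith('\\"u}', i + 3):
--                 out.append('ü'); i += 7; continue
--             if text.startswith('~n}', i + 3):
--                 out.append('ñ'); i += 6; continue
--         out.append(text[i]); i += 1
--     return ''.join(out)
-- ===== Notes on version B (the rewrite author's own statement) =====
-- stated objective: alternative
-- what changed: Replaces ten sequential whole-string str.replace passes (each rebuilding the string) with one positional left-to-right parser that recognises the open-brace/double-backslash marker and then the accent sequence by hand-written prefix tests, with no replacement table of LaTeX key strings and no str.replace at all; correct because no key is a prefix of or overlaps another and no replacement character re-creates a key.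
import Mathlib
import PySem

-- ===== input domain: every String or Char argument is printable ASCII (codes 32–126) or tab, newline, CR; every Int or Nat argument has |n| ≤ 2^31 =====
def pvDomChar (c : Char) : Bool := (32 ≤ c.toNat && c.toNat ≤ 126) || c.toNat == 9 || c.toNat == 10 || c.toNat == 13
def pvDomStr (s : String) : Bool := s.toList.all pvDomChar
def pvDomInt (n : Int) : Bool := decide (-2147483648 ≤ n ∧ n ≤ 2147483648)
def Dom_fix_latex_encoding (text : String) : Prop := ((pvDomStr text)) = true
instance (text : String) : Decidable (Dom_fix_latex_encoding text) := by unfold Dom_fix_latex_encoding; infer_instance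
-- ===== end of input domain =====

-- B replaces A's ten sequential whole-string str.replace passes by one positional left-to-right
-- parser that recognises the accent sequences by hand (objective: alternative algorithm).

-- ===== PORT A =====
-- the replacements dict, in insertion order (keys are Python raw strings: two literal backslashes,
-- three for the ü key)
def pvReplacements : List (String × String) :=
  [("{\\\\c{c}}", "ç"), ("{\\\\'e}", "é"), ("{\\\\`e}", "è"), ("{\\\\o}", "ø"),
   ("{\\\\\\\"u}", "ü"), ("{\\\\~n}", "ñ"), ("{\\\\'a}", "á"), ("{\\\\'i}", "í"),
   ("{\\\\'o}", "ó"), ("{\\\\'u}", "ú")]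

def fix_latex_encoding (text : String) : String :=
  pvReplacements.foldl (fun t p => PySem.Str.replace t p.1 p.2) text

-- ===== PORT B =====
-- Source B's acute-accent lookup {'e': 'é', …}
def pvAcute (c : Char) : Option Char :=
  if c = 'e' then some 'é' else if c = 'a' then some 'á' else if c = 'i' then some 'í'
  else if c = 'o' then some 'ó' else if c = 'u' then some 'ú' else none

-- the chain of startswith tests after the "{\\" marker (Source B's inner ifs, in order);
-- returns the UTF character and the rest of the input after the recognised sequence
def pvStep : List Char → Option (Char × List Char)
  | 'c' :: '{' :: 'c' :: '}' :: '}' :: t => some ('ç', t)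
  | '\'' :: x :: '}' :: t => (pvAcute x).map (fun u => (u, t))
  | '`' :: 'e' :: '}' :: t => some ('è', t)
  | 'o' :: '}' :: t => some ('ø', t)
  | '\\' :: '"' :: 'u' :: '}' :: t => some ('ü', t)
  | '~' :: 'n' :: '}' :: t => some ('ñ', t)
  | _ => none

-- the guarding startswith('{\\',i) test of Source B
def pvHead : List Char → Option (Char × List Char)
  | '{' :: '\\' :: '\\' :: r => pvStep r
  | _ => none

-- Source B's while loop; fuel = number of remaining characters (each iteration consumes ≥ 1)
def pvParseGo : Nat → List Char → List Char
  | 0, _ => []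
  | fuel + 1, l =>
    match l with
    | [] => []
    | c :: t =>
      match pvHead l with
      | some (u, r) => u :: pvParseGo fuel r
      | none => c :: pvParseGo fuel t

def fix_latex_encoding_alt (text : String) : String :=
  String.ofList (pvParseGo text.toList.length text.toList)

-- ===== PRECONDITION & SPEC =====
def Spec_fix_latex_encoding (text : String) (out : String) : Prop := out = fix_latex_encoding_alt text
instance (text : String) (out : String) : Decidable (Spec_fix_latex_encoding text out) := by unfold Spec_fix_latex_encoding; infer_instance

-- ===== CLAIM (what is proved, stated in full; the proofs are below) =====
def Claim_equal_fix_latex_encoding : Prop := ∀ (text : String), Dom_fix_latex_encoding text → Spec_fix_latex_encoding text (fix_latex_encoding text)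

-- ===== LEMMAS AND PROOFS =====

-- A's table on code points (proof-side view of port A)
def pvKeysC : List (List Char × List Char) :=
  pvReplacements.map (fun p => (p.1.toList, p.2.toList))

def pvPipe (ks : List (List Char × List Char)) (l : List Char) : List Char :=
  ks.foldl (fun s p => PySem.Chars.replace s p.1 p.2) l

def pvParse (l : List Char) : List Char := pvParseGo l.length l

-- ---- facts about PySem.Chars.replace.go ----

theorem pv_go_acc (old new : List Char) :
    ∀ (fuel : Nat) (l acc : List Char),
      PySem.Chars.replace.go old new fuel l acc = acc.reverse ++ PySem.Chars.replace.go old new fuel l [] := by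
  intro fuel
  induction fuel with
  | zero => intro l acc; simp [PySem.Chars.replace.go]
  | succ f ih =>
    intro l acc
    cases l with
    | nil => simp [PySem.Chars.replace.go]
    | cons c t =>
      by_cases h : old.isPrefixOf (c :: t)
      · simp only [PySem.Chars.replace.go, h, if_true]
        rw [ih _ (new.reverse ++ acc), ih _ (new.reverse ++ [])]
        simp
      · simp only [PySem.Chars.replace.go, h, Bool.false_eq_true, if_false]
        rw [ih t (c :: acc), ih t [c]]
        simp

theorem pv_len_pos (old : List Char) (hold : old ≠ []) : 1 ≤ old.length := by
  cases old with
  | nil => exact absurd rfl hold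
  | cons _ _ => simp

theorem pv_go_fuel (old new : List Char) (hold : old ≠ []) :
    ∀ (f f' : Nat) (l acc : List Char), l.length ≤ f → l.length ≤ f' →
      PySem.Chars.replace.go old new f l acc = PySem.Chars.replace.go old new f' l acc := by
  intro f
  induction f with
  | zero =>
    intro f' l acc hf hf'
    have : l = [] := List.eq_nil_of_length_eq_zero (Nat.le_zero.mp hf)
    subst this
    cases f' <;> simp [PySem.Chars.replace.go]
  | succ f ih =>
    intro f' l acc hf hf'
    cases l with
    | nil => cases f' <;> simp [PySem.Chars.replace.go]
    | cons c t =>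
      cases f' with
      | zero => simp at hf'
      | succ f'' =>
        have h1 : 1 ≤ old.length := pv_len_pos old hold
        by_cases h : old.isPrefixOf (c :: t)
        · simp only [PySem.Chars.replace.go, h, if_true]
          apply ih <;> simp at hf hf' ⊢ <;> omega
        · simp only [PySem.Chars.replace.go, h, Bool.false_eq_true, if_false]
          apply ih <;> simp at hf hf' ⊢ <;> omega

-- ---- the three defining equations of Chars.replace (for a nonempty pattern) ----

theorem pv_replace_unfold (old new l : List Char) (hold : old ≠ []) :
    PySem.Chars.replace l old new = PySem.Chars.replace.go old new l.length l [] := by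
  simp [PySem.Chars.replace, List.isEmpty_iff, hold]

theorem pv_replace_nil (old new : List Char) (hold : old ≠ []) :
    PySem.Chars.replace [] old new = [] := by
  rw [pv_replace_unfold old new [] hold]
  simp [PySem.Chars.replace.go]

theorem pv_replace_pos (old new l : List Char) (hold : old ≠ []) (h : old <+: l) :
    PySem.Chars.replace l old new = new ++ PySem.Chars.replace (l.drop old.length) old new := by
  have hl : l ≠ [] := by
    intro he; subst he; exact hold (List.prefix_nil.mp h)
  cases l with
  | nil => exact absurd rfl hl
  | cons c t =>
    have hb : old.isPrefixOf (c :: t) = true := List.isPrefixOf_iff_prefix.mpr h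
    rw [pv_replace_unfold _ _ _ hold, pv_replace_unfold _ _ _ hold]
    simp only [List.length_cons, PySem.Chars.replace.go, hb, if_true]
    rw [pv_go_acc]
    have h1 : 1 ≤ old.length := pv_len_pos old hold
    have hlen : (List.drop old.length (c :: t)).length ≤ t.length := by simp; omega
    rw [pv_go_fuel old new hold t.length (List.drop old.length (c :: t)).length _ [] hlen le_rfl]
    simp

theorem pv_replace_neg (old new : List Char) (c : Char) (t : List Char)
    (hold : old ≠ []) (h : ¬ old <+: (c :: t)) :
    PySem.Chars.replace (c :: t) old new = c :: PySem.Chars.replace t old new := by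
  have hb : old.isPrefixOf (c :: t) = false := by
    rw [← Bool.not_eq_true, List.isPrefixOf_iff_prefix]; exact h
  rw [pv_replace_unfold _ _ _ hold, pv_replace_unfold _ _ _ hold]
  simp only [List.length_cons, PySem.Chars.replace.go, hb, Bool.false_eq_true, if_false]
  rw [pv_go_acc]
  simp

-- ---- prefix combinatorics ----

theorem pv_prefix_append_cases {a b c : List Char} (h : a <+: b ++ c) : a <+: b ∨ b <+: a := by
  induction b generalizing a with
  | nil => right; exact List.nil_prefix
  | cons x b' ih =>
    cases a with
    | nil => left; exact List.nil_prefix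
    | cons y a' =>
      rw [List.cons_append, List.cons_prefix_cons] at h
      obtain ⟨rfl, h'⟩ := h
      rcases ih h' with h1 | h1
      · left; exact List.cons_prefix_cons.mpr ⟨rfl, h1⟩
      · right; exact List.cons_prefix_cons.mpr ⟨rfl, h1⟩

-- a key never matches at or straddling a position inside a different key: replace skips it whole
theorem pv_replace_skip (old new : List Char) (hold : old ≠ []) :
    ∀ (pre t : List Char),
      (∀ m, m < pre.length → ¬ old <+: pre.drop m ∧ ¬ pre.drop m <+: old) →
      PySem.Chars.replace (pre ++ t) old new = pre ++ PySem.Chars.replace t old new := by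
  intro pre
  induction pre with
  | nil => intro t _; simp
  | cons c p ih =>
    intro t hH
    have hnm : ¬ old <+: (c :: p) ++ t := by
      intro hpf
      rcases pv_prefix_append_cases hpf with h1 | h1
      · exact (hH 0 (by simp)).1 (by simpa using h1)
      · exact (hH 0 (by simp)).2 (by simpa using h1)
    rw [List.cons_append, pv_replace_neg old new c (p ++ t) hold (by simpa using hnm)]
    rw [ih t (fun m hm => hH (m + 1) (by simpa using Nat.succ_lt_succ hm))]
    simp

-- a single replaced character (outside every key) cannot create a new match
theorem pv_replace_transparent_n (old : List Char) (vc : Char) (hold : old ≠ []) :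
    ∀ (n : Nat) (l k' : List Char), l.length ≤ n →
      vc ∉ k' → k' <+: PySem.Chars.replace l old [vc] → k' <+: l := by
  intro n
  induction n with
  | zero =>
    intro l k' hl hvc hpf
    have : l = [] := List.eq_nil_of_length_eq_zero (Nat.le_zero.mp hl)
    subst this
    rw [pv_replace_nil old [vc] hold] at hpf
    exact hpf
  | succ n ih =>
    intro l k' hl hvc hpf
    by_cases hp : old <+: l
    · rw [pv_replace_pos old [vc] l hold hp] at hpf
      cases k' with
      | nil => exact List.nil_prefix
      | cons d k'' =>
        rw [List.singleton_append, List.cons_prefix_cons] at hpf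
        exact absurd (hpf.1 ▸ List.mem_cons_self) hvc
    · cases l with
      | nil =>
        rw [pv_replace_nil old [vc] hold] at hpf
        exact hpf
      | cons c t =>
        rw [pv_replace_neg old [vc] c t hold hp] at hpf
        cases k' with
        | nil => exact List.nil_prefix
        | cons d k'' =>
          rw [List.cons_prefix_cons] at hpf
          have h2 : k'' <+: t :=
            ih t k'' (by simp at hl; omega) (fun hm => hvc (List.mem_cons_of_mem _ hm)) hpf.2
          exact List.cons_prefix_cons.mpr ⟨hpf.1, h2⟩

theorem pv_replace_transparent (old : List Char) (vc : Char) (hold : old ≠ []) :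
    ∀ (l k' : List Char), vc ∉ k' → k' <+: PySem.Chars.replace l old [vc] → k' <+: l :=
  fun l k' => pv_replace_transparent_n old vc hold l.length l k' le_rfl

-- ---- decidable facts about the concrete table ----

set_option maxRecDepth 20000 in
theorem pv_keys_ne_nil : ∀ p ∈ pvKeysC, p.1 ≠ [] := by decide

set_option maxRecDepth 100000 in
theorem pv_keys_no_overlap :
    ∀ p ∈ pvKeysC, ∀ q ∈ pvKeysC, p.1 ≠ q.1 →
      ∀ m, m < q.1.length → ¬ p.1 <+: q.1.drop m ∧ ¬ q.1.drop m <+: p.1 := by decide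

set_option maxRecDepth 100000 in
theorem pv_keys_nodup : (pvKeysC.map Prod.fst).Nodup := by decide

set_option maxRecDepth 100000 in
theorem pv_vals_len : ∀ p ∈ pvKeysC, p.2.length = 1 := by decide

set_option maxRecDepth 100000 in
theorem pv_vals_fresh_b :
    (pvKeysC.all fun p => pvKeysC.all fun q => p.2.all fun c => !(q.1.contains c)) = true := by decide

theorem pv_vals_single : ∀ p ∈ pvKeysC, p.2.length = 1 ∧ ∀ q ∈ pvKeysC, ∀ c ∈ p.2, c ∉ q.1 := by
  have h := pv_vals_fresh_b
  simp only [List.all_eq_true, Bool.not_eq_eq_eq_not, Bool.not_true, List.contains_eq_mem,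
    decide_eq_false_iff_not] at h
  exact fun p hp => ⟨pv_vals_len p hp, fun q hq c hc => h p hp q hq c hc⟩

theorem pv_val_single (p : List Char × List Char) (hp : p ∈ pvKeysC) :
    ∃ vc, p.2 = [vc] ∧ ∀ q ∈ pvKeysC, vc ∉ q.1 := by
  obtain ⟨h1, h2⟩ := pv_vals_single p hp
  cases hv : p.2 with
  | nil => rw [hv] at h1; simp at h1
  | cons a u =>
    rw [hv] at h1
    simp at h1
    exact ⟨a, by simp [h1], fun q hq hm => h2 q hq a (by rw [hv]; simp) hm⟩

-- ---- pvHead characterisation: it finds exactly the table's matches ----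

set_option maxRecDepth 100000 in
theorem pv_keys_explicit : pvKeysC =
    [(['{','\\','\\','c','{','c','}','}'], ['ç']),
     (['{','\\','\\','\'','e','}'], ['é']),
     (['{','\\','\\','`','e','}'], ['è']),
     (['{','\\','\\','o','}'], ['ø']),
     (['{','\\','\\','\\','"','u','}'], ['ü']),
     (['{','\\','\\','~','n','}'], ['ñ']),
     (['{','\\','\\','\'','a','}'], ['á']),
     (['{','\\','\\','\'','i','}'], ['í']),
     (['{','\\','\\','\'','o','}'], ['ó']),
     (['{','\\','\\','\'','u','}'], ['ú'])] := by decide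

-- completeness: every table key is recognised by the parser's head test
theorem pv_head_key : ∀ p ∈ pvKeysC, ∀ (t : List Char) (u : Char), p.2 = [u] →
    pvHead (p.1 ++ t) = some (u, t) := by
  intro p hp
  rw [pv_keys_explicit] at hp
  simp only [List.mem_cons, List.not_mem_nil, or_false] at hp
  rcases hp with rfl | rfl | rfl | rfl | rfl | rfl | rfl | rfl | rfl | rfl <;>
    (intro t u hu; injection hu with hu _; subst hu; rfl)

-- soundness: whatever the parser's head test recognises is a table entry
theorem pv_head_some : ∀ (l : List Char) (u : Char) (r : List Char),
    pvHead l = some (u, r) → ∃ k, (k, [u]) ∈ pvKeysC ∧ l = k ++ r := by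
  intro l u r h
  rw [pvHead.eq_def] at h
  split at h
  case _ r0 =>
    rw [pvStep.eq_def] at h
    split at h
    · injection h with h'; injection h' with h1 h2; subst h1; subst h2
      exact ⟨['{','\\','\\','c','{','c','}','}'], by rw [pv_keys_explicit]; simp, rfl⟩
    case _ x t =>
      unfold pvAcute at h
      split_ifs at h with h1 h2 h3 h4 h5
      · subst h1
        simp only [Option.map_some, Option.some.injEq, Prod.mk.injEq] at h
        obtain ⟨rfl, rfl⟩ := h
        exact ⟨['{','\\','\\','\'','e','}'], by rw [pv_keys_explicit]; simp, rfl⟩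
      · subst h2
        simp only [Option.map_some, Option.some.injEq, Prod.mk.injEq] at h
        obtain ⟨rfl, rfl⟩ := h
        exact ⟨['{','\\','\\','\'','a','}'], by rw [pv_keys_explicit]; simp, rfl⟩
      · subst h3
        simp only [Option.map_some, Option.some.injEq, Prod.mk.injEq] at h
        obtain ⟨rfl, rfl⟩ := h
        exact ⟨['{','\\','\\','\'','i','}'], by rw [pv_keys_explicit]; simp, rfl⟩
      · subst h4
        simp only [Option.map_some, Option.some.injEq, Prod.mk.injEq] at h
        obtain ⟨rfl, rfl⟩ := h
        exact ⟨['{','\\','\\','\'','o','}'], by rw [pv_keys_explicit]; simp, rfl⟩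
      · subst h5
        simp only [Option.map_some, Option.some.injEq, Prod.mk.injEq] at h
        obtain ⟨rfl, rfl⟩ := h
        exact ⟨['{','\\','\\','\'','u','}'], by rw [pv_keys_explicit]; simp, rfl⟩
      · simp at h
    · injection h with h'; injection h' with h1 h2; subst h1; subst h2
      exact ⟨['{','\\','\\','`','e','}'], by rw [pv_keys_explicit]; simp, rfl⟩
    · injection h with h'; injection h' with h1 h2; subst h1; subst h2
      exact ⟨['{','\\','\\','o','}'], by rw [pv_keys_explicit]; simp, rfl⟩
    · injection h with h'; injection h' with h1 h2; subst h1; subst h2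
      exact ⟨['{','\\','\\','\\','"','u','}'], by rw [pv_keys_explicit]; simp, rfl⟩
    · injection h with h'; injection h' with h1 h2; subst h1; subst h2
      exact ⟨['{','\\','\\','~','n','}'], by rw [pv_keys_explicit]; simp, rfl⟩
    · exact absurd h (by simp)
  · exact absurd h (by simp)

theorem pv_head_none : ∀ (l : List Char), pvHead l = none →
    ∀ p ∈ pvKeysC, ¬ p.1 <+: l := by
  intro l h p hp hpf
  obtain ⟨t, rfl⟩ := hpf
  obtain ⟨vc, hvc, _⟩ := pv_val_single p hp
  rw [pv_head_key p hp t vc hvc] at h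
  simp at h

-- ---- pvParseGo: fuel irrelevance and defining equations ----

theorem pv_parseGo_nil : ∀ f, pvParseGo f [] = [] := by
  intro f; cases f <;> rfl

theorem pv_parseGo_fuel :
    ∀ (f f' : Nat) (l : List Char), l.length ≤ f → l.length ≤ f' →
      pvParseGo f l = pvParseGo f' l := by
  intro f
  induction f with
  | zero =>
    intro f' l hf _
    have : l = [] := List.eq_nil_of_length_eq_zero (Nat.le_zero.mp hf)
    subst this
    rw [pv_parseGo_nil, pv_parseGo_nil]
  | succ f ih =>
    intro f' l hf hf'
    cases l with
    | nil => rw [pv_parseGo_nil, pv_parseGo_nil]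
    | cons c t =>
      cases f' with
      | zero => simp at hf'
      | succ f'' =>
        cases h : pvHead (c :: t) with
        | some p =>
          obtain ⟨u, r⟩ := p
          obtain ⟨k, hk, heq⟩ := pv_head_some (c :: t) u r h
          have hkne : k ≠ [] := pv_keys_ne_nil (k, [u]) hk
          have h1 : 1 ≤ k.length := pv_len_pos k hkne
          have hlen : r.length + 1 ≤ (c :: t).length := by
            rw [heq]; simp; omega
          simp only [pvParseGo, h]
          congr 1
          apply ih <;> simp at hf hf' ⊢ <;> simp at hlen <;> omega
        | none =>
          simp only [pvParseGo, h]
          congr 1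
          apply ih <;> simp at hf hf' ⊢ <;> omega

theorem pv_parse_some (l : List Char) (u : Char) (r : List Char)
    (h : pvHead l = some (u, r)) : pvParse l = u :: pvParse r := by
  obtain ⟨k, hk, heq⟩ := pv_head_some l u r h
  have hkne : k ≠ [] := pv_keys_ne_nil (k, [u]) hk
  have h1 : 1 ≤ k.length := pv_len_pos k hkne
  have hlne : l ≠ [] := by
    intro he; subst he
    exact hkne (by cases k with
      | nil => rfl
      | cons a b => simp at heq)
  cases l with
  | nil => exact absurd rfl hlne
  | cons c t =>
    unfold pvParse
    simp only [List.length_cons, pvParseGo, h]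
    congr 1
    apply pv_parseGo_fuel
    · have : (c :: t).length = k.length + r.length := by rw [heq]; simp
      simp at this; omega
    · exact le_rfl

theorem pv_parse_none (c : Char) (t : List Char) (h : pvHead (c :: t) = none) :
    pvParse (c :: t) = c :: pvParse t := by
  unfold pvParse
  simp only [List.length_cons, pvParseGo, h]

-- ---- pipeline lemmas ----

theorem pv_pipe_nil :
    ∀ (ks : List (List Char × List Char)), (∀ p ∈ ks, p ∈ pvKeysC) → pvPipe ks [] = [] := by
  intro ks
  induction ks with
  | nil => intro _; rfl
  | cons q r ih =>
    intro hsub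
    unfold pvPipe
    simp only [List.foldl_cons]
    rw [pv_replace_nil q.1 q.2 (pv_keys_ne_nil q (hsub q List.mem_cons_self))]
    exact ih (fun p hp => hsub p (List.mem_cons_of_mem _ hp))

-- every key of the table skips a whole different key
theorem pv_pipe_skip :
    ∀ (pre : List (List Char × List Char)) (kj vj t : List Char),
      (kj, vj) ∈ pvKeysC →
      (∀ p ∈ pre, p ∈ pvKeysC ∧ p.1 ≠ kj) →
      pvPipe pre (kj ++ t) = kj ++ pvPipe pre t := by
  intro pre
  induction pre with
  | nil => intro kj vj t _ _; rfl
  | cons q r ih =>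
    intro kj vj t hkj hsub
    have hq := hsub q List.mem_cons_self
    unfold pvPipe
    simp only [List.foldl_cons]
    rw [pv_replace_skip q.1 q.2 (pv_keys_ne_nil q hq.1) kj t
      (pv_keys_no_overlap q hq.1 (kj, vj) hkj hq.2)]
    exact ih kj vj (PySem.Chars.replace t q.1 q.2) hkj
      (fun p hp => hsub p (List.mem_cons_of_mem _ hp))

-- a replaced (non-ASCII) character passes through every later replace
theorem pv_pipe_value :
    ∀ (post : List (List Char × List Char)) (vc : Char) (w : List Char),
      (∀ p ∈ post, p ∈ pvKeysC) →
      (∀ q ∈ pvKeysC, vc ∉ q.1) →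
      pvPipe post (vc :: w) = vc :: pvPipe post w := by
  intro post
  induction post with
  | nil => intro vc w _ _; rfl
  | cons q r ih =>
    intro vc w hsub hvc
    have hq := hsub q List.mem_cons_self
    have hkne : q.1 ≠ [] := pv_keys_ne_nil q hq
    have hnp : ¬ q.1 <+: vc :: w := by
      intro hc
      cases hk : q.1 with
      | nil => exact hkne hk
      | cons d k'' =>
        rw [hk, List.cons_prefix_cons] at hc
        exact hvc q hq (by rw [hk, hc.1]; exact List.mem_cons_self)
    unfold pvPipe
    simp only [List.foldl_cons]
    rw [pv_replace_neg q.1 q.2 vc w hkne hnp]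
    exact ih vc (PySem.Chars.replace w q.1 q.2) (fun p hp => hsub p (List.mem_cons_of_mem _ hp)) hvc

-- when no key matches at the head, the head character passes through the whole pipeline
theorem pv_pipe_head :
    ∀ (ks : List (List Char × List Char)),
      (∀ p ∈ ks, p ∈ pvKeysC) →
      ∀ (c : Char) (t : List Char),
        (∀ q ∈ pvKeysC, ¬ q.1 <+: c :: t) →
        pvPipe ks (c :: t) = c :: pvPipe ks t := by
  intro ks
  induction ks with
  | nil => intro _ c t _; rfl
  | cons q r ih =>
    intro hsub c t hno
    have hq := hsub q List.mem_cons_self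
    have hkne : q.1 ≠ [] := pv_keys_ne_nil q hq
    have hrepl : PySem.Chars.replace (c :: t) q.1 q.2 = c :: PySem.Chars.replace t q.1 q.2 :=
      pv_replace_neg q.1 q.2 c t hkne (hno q hq)
    unfold pvPipe
    simp only [List.foldl_cons]
    rw [hrepl]
    apply ih (fun p hp => hsub p (List.mem_cons_of_mem _ hp))
    intro q' hq' hc
    obtain ⟨vc, hvc, hnotin⟩ := pv_val_single q hq
    have hvcq : vc ∉ q'.1 := fun hm => hnotin q' hq' hm
    rw [← hrepl] at hc
    rw [hvc] at hc
    exact hno q' hq' (pv_replace_transparent q.1 vc hkne (c :: t) q'.1 hvcq hc)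

-- ---- main equivalence on character lists ----

theorem pv_main : ∀ (n : Nat) (l : List Char), l.length ≤ n → pvPipe pvKeysC l = pvParse l := by
  intro n
  induction n with
  | zero =>
    intro l hl
    have : l = [] := List.eq_nil_of_length_eq_zero (Nat.le_zero.mp hl)
    subst this
    rw [pv_pipe_nil pvKeysC (fun p hp => hp)]; rfl
  | succ n ih =>
    intro l hl
    cases hl0 : l with
    | nil =>
      subst hl0
      rw [pv_pipe_nil pvKeysC (fun p hp => hp)]; rfl
    | cons c t =>
      rw [← hl0]
      cases h : pvHead l with
      | some p =>
        obtain ⟨u, r⟩ := p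
        obtain ⟨k, hkmem, heq⟩ := pv_head_some l u r h
        have hkne : k ≠ [] := pv_keys_ne_nil (k, [u]) hkmem
        have h1 : 1 ≤ k.length := pv_len_pos k hkne
        obtain ⟨pre, post, htab⟩ := List.append_of_mem hkmem
        have hnd := pv_keys_nodup
        rw [htab] at hnd
        simp only [List.map_append, List.map_cons, List.nodup_append] at hnd
        have hpre_sub : ∀ p ∈ pre, p ∈ pvKeysC ∧ p.1 ≠ k := by
          intro p hp
          refine ⟨by rw [htab]; exact List.mem_append_left _ hp, ?_⟩
          intro hc
          have : k ∈ pre.map Prod.fst := by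
            rw [← hc]; exact List.mem_map_of_mem hp
          exact (hnd.2.2 k this k List.mem_cons_self) rfl
        have hpost_sub : ∀ p ∈ post, p ∈ pvKeysC := by
          intro p hp; rw [htab]; exact List.mem_append_right _ (List.mem_cons_of_mem _ hp)
        have hvcnot0 : ∀ q ∈ pvKeysC, u ∉ q.1 := by
          obtain ⟨vc, hvc0, hn⟩ := pv_val_single (k, [u]) hkmem
          have hvu : vc = u := by simpa using hvc0.symm
          subst hvu; exact hn
        have hulen : r.length ≤ n := by
          have h2 : l.length = k.length + r.length := by rw [heq]; simp
          omega
        subst heq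
        calc pvPipe pvKeysC (k ++ r)
            = pvPipe ((k, [u]) :: post) (pvPipe pre (k ++ r)) := by
              rw [htab]; unfold pvPipe; rw [List.foldl_append]
          _ = pvPipe ((k, [u]) :: post) (k ++ pvPipe pre r) := by
              rw [pv_pipe_skip pre k [u] r hkmem hpre_sub]
          _ = pvPipe post (PySem.Chars.replace (k ++ pvPipe pre r) k [u]) := by
              unfold pvPipe; simp
          _ = pvPipe post ([u] ++ PySem.Chars.replace (pvPipe pre r) k [u]) := by
              rw [pv_replace_pos k [u] _ hkne (List.prefix_append k _), List.drop_left]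
          _ = u :: pvPipe post (PySem.Chars.replace (pvPipe pre r) k [u]) := by
              rw [List.singleton_append, pv_pipe_value post u _ hpost_sub hvcnot0]
          _ = u :: pvPipe ((k, [u]) :: post) (pvPipe pre r) := by
              unfold pvPipe; simp
          _ = u :: pvPipe pvKeysC r := by
              rw [htab]; unfold pvPipe; rw [List.foldl_append]
          _ = u :: pvParse r := by rw [ih r hulen]
          _ = pvParse (k ++ r) := by rw [pv_parse_some (k ++ r) u r h]
      | none =>
        subst hl0
        have hno : ∀ q ∈ pvKeysC, ¬ q.1 <+: c :: t := pv_head_none (c :: t) h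
        rw [pv_pipe_head pvKeysC (fun p hp => hp) c t hno]
        rw [ih t (by simp at hl; omega)]
        rw [pv_parse_none c t h]

-- ---- lifting to strings ----

theorem pv_portA_toList :
    ∀ (ks : List (String × String)) (t : String),
      (ks.foldl (fun s p => PySem.Str.replace s p.1 p.2) t).toList =
        pvPipe (ks.map (fun p => (p.1.toList, p.2.toList))) t.toList := by
  intro ks
  induction ks with
  | nil => intro t; rfl
  | cons q r ih =>
    intro t
    unfold pvPipe
    simp only [List.foldl_cons, List.map_cons]
    rw [ih (PySem.Str.replace t q.1 q.2), PySem.Str.toList_replace]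
    rfl

-- ===== VERDICT (by name: the statement is the Claim_ definition above) =====
theorem fix_latex_encoding_spec : Claim_equal_fix_latex_encoding := by
  intro text _
  unfold Spec_fix_latex_encoding fix_latex_encoding fix_latex_encoding_alt
  have h1 : (pvReplacements.foldl (fun t p => PySem.Str.replace t p.1 p.2) text).toList =
      pvPipe pvKeysC text.toList := pv_portA_toList pvReplacements text
  have h2 : pvPipe pvKeysC text.toList = pvParse text.toList :=
    pv_main text.toList.length text.toList le_rfl
  calc pvReplacements.foldl (fun t p => PySem.Str.replace t p.1 p.2) text
      = String.ofList (pvReplacements.foldl (fun t p => PySem.Str.replace t p.1 p.2) text).toList := by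
        rw [String.ofList_toList]
    _ = String.ofList (pvParseGo text.toList.length text.toList) := by rw [h1, h2]; rfl
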